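-- pv_equiv track=rewrite | github.com/NiritNu/Caual_project_symetric | utils/prompt_utils.py | OneByOnePrompt2RecursiveHistoryBased
-- ===== SOURCE A (Python) =====
-- def OneByOnePrompt2RecursiveHistoryBased(json_objects, current_label_chat, TargetConcept,reason_for_label):
--     # Start the prompt by clearly stating the purpose: providing feedback on responses.
--     #check if all items have a label of '3' dont do a thimg
--     if all(label == 3 for label in current_label_chat):
--         return "All items have been successfully labeled with '3'. No further modifications are needed."
--     base_prompt = "Here's the feedback I've received on the responses you modified, broken down by each item:"
--
--     good_example_flag = False # Flag to track if any item received a '3' label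
--
--     # Loop through each item to provide specific feedback
--     for i, example in enumerate(json_objects):
--         # Only provide detailed feedback for items that are NOT labeled '3'
--         if current_label_chat[i] != 3:
--             base_prompt += f"\n\nFeedback Item {i+1}:"
--             base_prompt += f"\nOriginal Index: {example['Original Index']}"
--             base_prompt += f"\nLabel Received: {current_label_chat[i]} – meaning: "
--
--             if current_label_chat[i] == 1:
--                 # Label 1: Chosen response is better for the concept
--                 base_prompt += f"The chosen response better represents the concept '{TargetConcept}'."
--             elif current_label_chat[i] == 2:
--                 # Label 2: Target concept is missing from both responses
--                 base_prompt += f"The concept '{TargetConcept}' is not present in any response."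
--             elif current_label_chat[i] == 0:
--                 # Label 0: Both responses represent the concept equally (or equally poorly)
--                 base_prompt += f"The concept '{TargetConcept}' is equally represented in both the chosen and rejected responses."
--             base_prompt += 'This is the reason the llm gave for the target concept label:'
--             base_prompt += f"\n The reason of one of the llms that labeled the concept: {reason_for_label[TargetConcept]}"
--         else:
--             # If a label '3' is found, set the flag. We'll list these separately later.
--             good_example_flag = True
--
--     # Main instruction for items that need further modification
--     base_prompt += "\n\nBased on this feedback and the reason the llm gave for the labeling, the responses for the items listed above are NOT yet meeting the desired outcome. Please continue to refine their chosen and rejected responses, ensuring you strictly follow the original instructions."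
--
--     # Crucial guidelines for how to perform the modifications
--     base_prompt += "\n\nCrucial Guidelines for Modifications:"
--     base_prompt += "\n- Always base your changes on the *original* chosen and rejected responses to preserve their core meaning and context."
--     base_prompt += "\n- Continue modifying the responses until they are *better* than the original ones, but *never* change the fundamental meaning of either response."
--     base_prompt += "\n- Ensure both the chosen and rejected responses remain *coherent* and *consistent* with their original context." #
--     base_prompt +="\n- add to the reasoninig , how you consider the reason the llm gave for the labeling in you modifications."
--
--     # If there were any items with a '3' label, list them as completed.
--     if good_example_flag:
--         base_prompt += "\n\nGood news! For the following items, the concept is now correctly represented in the rejected response. These items are complete and require no further changes:"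
--         # Loop again specifically to list items with label '3'
--         for k, example_k in enumerate(json_objects):
--             if current_label_chat[k] == 3:
--                 base_prompt += f"\n- Item {k+1} (Original Index: {example_k['Original Index']}): Label Received: {current_label_chat[k]} – meaning: The concept '{TargetConcept}' is now correctly represented in the rejected response."
--
--     return base_prompt
-- ===== SOURCE B (Python) =====
-- def _meaning(label, TargetConcept):
--     if label == 1:
--         return f"The chosen response better represents the concept '{TargetConcept}'."
--     if label == 2:
--         return f"The concept '{TargetConcept}' is not present in any response."
--     if label == 0:
--         return f"The concept '{TargetConcept}' is equally represented in both the chosen and rejected responses."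
--     return ""
--
--
-- def _feedback_block(i, example, label, TargetConcept, reason_for_label):
--     return (f"\n\nFeedback Item {i + 1}:"
--             f"\nOriginal Index: {example['Original Index']}"
--             f"\nLabel Received: {label} – meaning: "
--             + _meaning(label, TargetConcept)
--             + "This is the reason the llm gave for the target concept label:"
--             f"\n The reason of one of the llms that labeled the concept: {reason_for_label[TargetConcept]}")
--
--
-- def _completed_block(i, example, label, TargetConcept):
--     return (f"\n- Item {i + 1} (Original Index: {example['Original Index']}): "
--             f"Label Received: {label} – meaning: The concept '{TargetConcept}' is now correctly represented in the rejected response.")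
--
--
-- def OneByOnePrompt2RecursiveHistoryBased(json_objects, current_label_chat, TargetConcept, reason_for_label):
--     if all(label == 3 for label in current_label_chat):
--         return "All items have been successfully labeled with '3'. No further modifications are needed."
--     feedback_parts = []
--     completed_parts = []
--     for i, example in enumerate(json_objects):
--         label = current_label_chat[i]
--         if label == 3:
--             completed_parts.append(_completed_block(i, example, label, TargetConcept))
--         else:
--             feedback_parts.append(_feedback_block(i, example, label, TargetConcept, reason_for_label))
--     result = ("Here's the feedback I've received on the responses you modified, broken down by each item:"
--               + "".join(feedback_parts)
--               + "\n\nBased on this feedback and the reason the llm gave for the labeling, the responses for the items listed above are NOT yet meeting the desired outcome. Please continue to refine their chosen and rejected responses, ensuring you strictly follow the original instructions."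
--               "\n\nCrucial Guidelines for Modifications:"
--               "\n- Always base your changes on the *original* chosen and rejected responses to preserve their core meaning and context."
--               "\n- Continue modifying the responses until they are *better* than the original ones, but *never* change the fundamental meaning of either response."
--               "\n- Ensure both the chosen and rejected responses remain *coherent* and *consistent* with their original context."
--               "\n- add to the reasoninig , how you consider the reason the llm gave for the labeling in you modifications.")
--     if completed_parts:
--         result += ("\n\nGood news! For the following items, the concept is now correctly represented in the rejected response. These items are complete and require no further changes:"
--                    + "".join(completed_parts))
--     return result
-- ===== Notes on version B (the rewrite author's own statement) =====
-- stated objective: alternative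
-- what changed: Instead of A's two full scans that grow one big string (feedback scan with a flag, then a second scan for label-3 items), B makes a single partitioning pass collecting per-item feedback blocks and completed-item lines into two lists via small helper functions, then assembles the result by joining the two sections.
import Mathlib
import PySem

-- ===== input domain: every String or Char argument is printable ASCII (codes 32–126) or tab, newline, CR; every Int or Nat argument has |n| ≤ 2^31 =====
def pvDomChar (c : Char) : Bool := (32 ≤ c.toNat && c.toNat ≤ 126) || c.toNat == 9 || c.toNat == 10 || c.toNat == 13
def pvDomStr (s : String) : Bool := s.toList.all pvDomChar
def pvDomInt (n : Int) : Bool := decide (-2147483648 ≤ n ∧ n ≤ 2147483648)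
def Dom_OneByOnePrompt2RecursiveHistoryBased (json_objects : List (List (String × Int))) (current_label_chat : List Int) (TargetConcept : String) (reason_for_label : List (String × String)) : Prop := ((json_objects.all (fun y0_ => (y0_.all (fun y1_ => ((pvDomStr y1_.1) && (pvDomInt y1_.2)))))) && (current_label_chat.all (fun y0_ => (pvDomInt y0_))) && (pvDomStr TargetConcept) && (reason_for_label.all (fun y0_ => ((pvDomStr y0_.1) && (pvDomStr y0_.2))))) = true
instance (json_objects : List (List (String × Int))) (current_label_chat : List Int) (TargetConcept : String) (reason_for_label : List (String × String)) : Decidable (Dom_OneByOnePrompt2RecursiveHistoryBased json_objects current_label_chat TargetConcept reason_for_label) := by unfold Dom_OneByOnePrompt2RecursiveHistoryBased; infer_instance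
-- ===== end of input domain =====

-- B replaces A's two full scans and incremental string accumulation by one partitioning pass that
-- collects per-item feedback/completed block strings into two lists, joined during final assembly
-- (objective: alternative decomposition, same cost).

-- ===== PORT A =====
def OneByOnePrompt2RecursiveHistoryBased (json_objects : List (List (String × Int))) (current_label_chat : List Int) (TargetConcept : String) (reason_for_label : List (String × String)) : String :=
  if current_label_chat.all (fun label => label == 3) then
    "All items have been successfully labeled with '3'. No further modifications are needed."
  else
    -- first loop: accumulate feedback text for non-3 items into base_prompt, track good_example_flag
    let st :=
      (PySem.List.enumerate json_objects).foldl (fun st p =>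
        let label := PySem.List.pyGetD current_label_chat p.1 0
        if label ≠ 3 then
          (st.1
            ++ "\n\nFeedback Item " ++ PySem.Int.toStr (p.1 + 1) ++ ":"
            ++ "\nOriginal Index: " ++ PySem.Int.toStr ((PySem.Dict.mk p.2).getD "Original Index" 0)
            ++ "\nLabel Received: " ++ PySem.Int.toStr label ++ " – meaning: "
            ++ (if label == 1 then "The chosen response better represents the concept '" ++ TargetConcept ++ "'."
                else if label == 2 then "The concept '" ++ TargetConcept ++ "' is not present in any response."
                else if label == 0 then "The concept '" ++ TargetConcept ++ "' is equally represented in both the chosen and rejected responses."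
                else "")
            ++ "This is the reason the llm gave for the target concept label:"
            ++ "\n The reason of one of the llms that labeled the concept: "
            ++ (PySem.Dict.mk reason_for_label).getD TargetConcept "",
           st.2)
        else
          (st.1, true))
        ("Here's the feedback I've received on the responses you modified, broken down by each item:", false)
    let base := st.1
      ++ "\n\nBased on this feedback and the reason the llm gave for the labeling, the responses for the items listed above are NOT yet meeting the desired outcome. Please continue to refine their chosen and rejected responses, ensuring you strictly follow the original instructions."
      ++ "\n\nCrucial Guidelines for Modifications:"
      ++ "\n- Always base your changes on the *original* chosen and rejected responses to preserve their core meaning and context."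
      ++ "\n- Continue modifying the responses until they are *better* than the original ones, but *never* change the fundamental meaning of either response."
      ++ "\n- Ensure both the chosen and rejected responses remain *coherent* and *consistent* with their original context."
      ++ "\n- add to the reasoninig , how you consider the reason the llm gave for the labeling in you modifications."
    if st.2 then
      -- second loop: list the label-3 items
      (PySem.List.enumerate json_objects).foldl (fun bp p =>
        let label := PySem.List.pyGetD current_label_chat p.1 0
        if label == 3 then
          bp ++ "\n- Item " ++ PySem.Int.toStr (p.1 + 1)
             ++ " (Original Index: " ++ PySem.Int.toStr ((PySem.Dict.mk p.2).getD "Original Index" 0)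
             ++ "): Label Received: " ++ PySem.Int.toStr label
             ++ " – meaning: The concept '" ++ TargetConcept
             ++ "' is now correctly represented in the rejected response."
        else bp)
        (base ++ "\n\nGood news! For the following items, the concept is now correctly represented in the rejected response. These items are complete and require no further changes:")
    else base

-- ===== PORT B =====
-- B-side helpers (the helper functions of Source B)
def pvMeaning (label : Int) (TargetConcept : String) : String :=
  if label == 1 then "The chosen response better represents the concept '" ++ TargetConcept ++ "'."
  else if label == 2 then "The concept '" ++ TargetConcept ++ "' is not present in any response."
  else if label == 0 then "The concept '" ++ TargetConcept ++ "' is equally represented in both the chosen and rejected responses."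
  else ""

def pvFeedbackBlock (i : Int) (ex : List (String × Int)) (label : Int) (TargetConcept : String) (reason_for_label : List (String × String)) : String :=
  "\n\nFeedback Item " ++ PySem.Int.toStr (i + 1) ++ ":"
    ++ "\nOriginal Index: " ++ PySem.Int.toStr ((PySem.Dict.mk ex).getD "Original Index" 0)
    ++ "\nLabel Received: " ++ PySem.Int.toStr label ++ " – meaning: "
    ++ pvMeaning label TargetConcept
    ++ "This is the reason the llm gave for the target concept label:"
    ++ "\n The reason of one of the llms that labeled the concept: "
    ++ (PySem.Dict.mk reason_for_label).getD TargetConcept ""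

def pvCompletedBlock (i : Int) (ex : List (String × Int)) (label : Int) (TargetConcept : String) : String :=
  "\n- Item " ++ PySem.Int.toStr (i + 1)
    ++ " (Original Index: " ++ PySem.Int.toStr ((PySem.Dict.mk ex).getD "Original Index" 0)
    ++ "): Label Received: " ++ PySem.Int.toStr label
    ++ " – meaning: The concept '" ++ TargetConcept
    ++ "' is now correctly represented in the rejected response."

def OneByOnePrompt2RecursiveHistoryBased_alt (json_objects : List (List (String × Int))) (current_label_chat : List Int) (TargetConcept : String) (reason_for_label : List (String × String)) : String :=
  if current_label_chat.all (fun label => label == 3) then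
    "All items have been successfully labeled with '3'. No further modifications are needed."
  else
    -- one partitioning pass: (feedback_parts, completed_parts)
    let parts :=
      (PySem.List.enumerate json_objects).foldl (fun parts p =>
        let label := PySem.List.pyGetD current_label_chat p.1 0
        if label == 3 then
          (parts.1, parts.2 ++ [pvCompletedBlock p.1 p.2 label TargetConcept])
        else
          (parts.1 ++ [pvFeedbackBlock p.1 p.2 label TargetConcept reason_for_label], parts.2))
        (([] : List String), ([] : List String))
    let result :=
      "Here's the feedback I've received on the responses you modified, broken down by each item:"
        ++ String.join parts.1
        ++ "\n\nBased on this feedback and the reason the llm gave for the labeling, the responses for the items listed above are NOT yet meeting the desired outcome. Please continue to refine their chosen and rejected responses, ensuring you strictly follow the original instructions.\n\nCrucial Guidelines for Modifications:\n- Always base your changes on the *original* chosen and rejected responses to preserve their core meaning and context.\n- Continue modifying the responses until they are *better* than the original ones, but *never* change the fundamental meaning of either response.\n- Ensure both the chosen and rejected responses remain *coherent* and *consistent* with their original context.\n- add to the reasoninig , how you consider the reason the llm gave for the labeling in you modifications."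
    if parts.2 ≠ [] then
      result
        ++ "\n\nGood news! For the following items, the concept is now correctly represented in the rejected response. These items are complete and require no further changes:"
        ++ String.join parts.2
    else result

-- ===== PRECONDITION & SPEC =====
-- Pre_ excludes exactly the inputs where the Python A raises: when not all labels are 3 it needs
-- one label per item (IndexError), the 'Original Index' key in every item (KeyError), and — if some
-- paired item is not labeled 3 — the TargetConcept key in reason_for_label (KeyError).
def Pre_OneByOnePrompt2RecursiveHistoryBased (json_objects : List (List (String × Int))) (current_label_chat : List Int) (TargetConcept : String) (reason_for_label : List (String × String)) : Prop :=
  (∀ l ∈ current_label_chat, l = 3) ∨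
  (json_objects.length ≤ current_label_chat.length ∧
   (∀ ex ∈ json_objects, ex.any (fun q => q.1 == "Original Index")) ∧
   ((∃ p ∈ json_objects.zip current_label_chat, p.2 ≠ 3) → reason_for_label.any (fun q => q.1 == TargetConcept)))
instance (json_objects : List (List (String × Int))) (current_label_chat : List Int) (TargetConcept : String) (reason_for_label : List (String × String)) : Decidable (Pre_OneByOnePrompt2RecursiveHistoryBased json_objects current_label_chat TargetConcept reason_for_label) := by unfold Pre_OneByOnePrompt2RecursiveHistoryBased; infer_instance

def pvWitness_OneByOnePrompt2RecursiveHistoryBased : (List (List (String × Int))) × List Int × String × (List (String × String)) :=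
  ([[("Original Index", 5)]], [1], "c", [("c", "why")])

def Spec_OneByOnePrompt2RecursiveHistoryBased (json_objects : List (List (String × Int))) (current_label_chat : List Int) (TargetConcept : String) (reason_for_label : List (String × String)) (out : String) : Prop := out = OneByOnePrompt2RecursiveHistoryBased_alt json_objects current_label_chat TargetConcept reason_for_label
instance (json_objects : List (List (String × Int))) (current_label_chat : List Int) (TargetConcept : String) (reason_for_label : List (String × String)) (out : String) : Decidable (Spec_OneByOnePrompt2RecursiveHistoryBased json_objects current_label_chat TargetConcept reason_for_label out) := by unfold Spec_OneByOnePrompt2RecursiveHistoryBased; infer_instance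

-- ===== CLAIM (what is proved, stated in full; the proofs are below) =====
def Claim_equal_OneByOnePrompt2RecursiveHistoryBased : Prop := ∀ (json_objects : List (List (String × Int))) (current_label_chat : List Int) (TargetConcept : String) (reason_for_label : List (String × String)), Dom_OneByOnePrompt2RecursiveHistoryBased json_objects current_label_chat TargetConcept reason_for_label → Pre_OneByOnePrompt2RecursiveHistoryBased json_objects current_label_chat TargetConcept reason_for_label → Spec_OneByOnePrompt2RecursiveHistoryBased json_objects current_label_chat TargetConcept reason_for_label (OneByOnePrompt2RecursiveHistoryBased json_objects current_label_chat TargetConcept reason_for_label)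

-- ===== LEMMAS AND PROOFS =====

theorem OneByOnePrompt2RecursiveHistoryBased_witness_ok :
    Dom_OneByOnePrompt2RecursiveHistoryBased (pvWitness_OneByOnePrompt2RecursiveHistoryBased.1) (pvWitness_OneByOnePrompt2RecursiveHistoryBased.2.1) (pvWitness_OneByOnePrompt2RecursiveHistoryBased.2.2.1) (pvWitness_OneByOnePrompt2RecursiveHistoryBased.2.2.2) ∧
    Pre_OneByOnePrompt2RecursiveHistoryBased (pvWitness_OneByOnePrompt2RecursiveHistoryBased.1) (pvWitness_OneByOnePrompt2RecursiveHistoryBased.2.1) (pvWitness_OneByOnePrompt2RecursiveHistoryBased.2.2.1) (pvWitness_OneByOnePrompt2RecursiveHistoryBased.2.2.2) := by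
  decide


-- proof helpers: the per-item label, the optional block each item contributes to each section,
-- and named versions of the three loop bodies
def pvLab (chat : List Int) (p : Int × List (String × Int)) : Int := PySem.List.pyGetD chat p.1 0

def pvFb? (chat : List Int) (TC : String) (rl : List (String × String)) (p : Int × List (String × Int)) : Option String :=
  if pvLab chat p = 3 then none else some (pvFeedbackBlock p.1 p.2 (pvLab chat p) TC rl)

def pvCp? (chat : List Int) (TC : String) (p : Int × List (String × Int)) : Option String :=
  if pvLab chat p = 3 then some (pvCompletedBlock p.1 p.2 (pvLab chat p) TC) else none

def pvAStep1 (chat : List Int) (TC : String) (rl : List (String × String))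
    (st : String × Bool) (p : Int × List (String × Int)) : String × Bool :=
  let label := PySem.List.pyGetD chat p.1 0
  if label ≠ 3 then
    (st.1
      ++ "\n\nFeedback Item " ++ PySem.Int.toStr (p.1 + 1) ++ ":"
      ++ "\nOriginal Index: " ++ PySem.Int.toStr ((PySem.Dict.mk p.2).getD "Original Index" 0)
      ++ "\nLabel Received: " ++ PySem.Int.toStr label ++ " – meaning: "
      ++ (if label == 1 then "The chosen response better represents the concept '" ++ TC ++ "'."
          else if label == 2 then "The concept '" ++ TC ++ "' is not present in any response."
          else if label == 0 then "The concept '" ++ TC ++ "' is equally represented in both the chosen and rejected responses."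
          else "")
      ++ "This is the reason the llm gave for the target concept label:"
      ++ "\n The reason of one of the llms that labeled the concept: "
      ++ (PySem.Dict.mk rl).getD TC "",
     st.2)
  else
    (st.1, true)

def pvAStep2 (chat : List Int) (TC : String)
    (bp : String) (p : Int × List (String × Int)) : String :=
  let label := PySem.List.pyGetD chat p.1 0
  if label == 3 then
    bp ++ "\n- Item " ++ PySem.Int.toStr (p.1 + 1)
       ++ " (Original Index: " ++ PySem.Int.toStr ((PySem.Dict.mk p.2).getD "Original Index" 0)
       ++ "): Label Received: " ++ PySem.Int.toStr label
       ++ " – meaning: The concept '" ++ TC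
       ++ "' is now correctly represented in the rejected response."
  else bp

def pvBStep (chat : List Int) (TC : String) (rl : List (String × String))
    (parts : List String × List String) (p : Int × List (String × Int)) : List String × List String :=
  let label := PySem.List.pyGetD chat p.1 0
  if label == 3 then
    (parts.1, parts.2 ++ [pvCompletedBlock p.1 p.2 label TC])
  else
    (parts.1 ++ [pvFeedbackBlock p.1 p.2 label TC rl], parts.2)

theorem pvAStep1_three (chat : List Int) (TC : String) (rl : List (String × String))
    (st : String × Bool) (p : Int × List (String × Int)) (h : PySem.List.pyGetD chat p.1 0 = 3) :
    pvAStep1 chat TC rl st p = (st.1, true) := by simp [pvAStep1, h]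

theorem pvAStep1_not_three (chat : List Int) (TC : String) (rl : List (String × String))
    (st : String × Bool) (p : Int × List (String × Int)) (h : ¬ PySem.List.pyGetD chat p.1 0 = 3) :
    pvAStep1 chat TC rl st p = (st.1 ++ pvFeedbackBlock p.1 p.2 (PySem.List.pyGetD chat p.1 0) TC rl, st.2) := by
  simp [pvAStep1, h, pvFeedbackBlock, pvMeaning, String.append_assoc]

theorem pvAStep2_three (chat : List Int) (TC : String)
    (bp : String) (p : Int × List (String × Int)) (h : PySem.List.pyGetD chat p.1 0 = 3) :
    pvAStep2 chat TC bp p = bp ++ pvCompletedBlock p.1 p.2 (PySem.List.pyGetD chat p.1 0) TC := by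
  simp [pvAStep2, h, pvCompletedBlock, String.append_assoc]

theorem pvAStep2_not_three (chat : List Int) (TC : String)
    (bp : String) (p : Int × List (String × Int)) (h : ¬ PySem.List.pyGetD chat p.1 0 = 3) :
    pvAStep2 chat TC bp p = bp := by simp [pvAStep2, h]

theorem pvBStep_three (chat : List Int) (TC : String) (rl : List (String × String))
    (parts : List String × List String) (p : Int × List (String × Int)) (h : PySem.List.pyGetD chat p.1 0 = 3) :
    pvBStep chat TC rl parts p = (parts.1, parts.2 ++ [pvCompletedBlock p.1 p.2 (PySem.List.pyGetD chat p.1 0) TC]) := by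
  simp [pvBStep, h]

theorem pvBStep_not_three (chat : List Int) (TC : String) (rl : List (String × String))
    (parts : List String × List String) (p : Int × List (String × Int)) (h : ¬ PySem.List.pyGetD chat p.1 0 = 3) :
    pvBStep chat TC rl parts p = (parts.1 ++ [pvFeedbackBlock p.1 p.2 (PySem.List.pyGetD chat p.1 0) TC rl], parts.2) := by
  simp [pvBStep, h]

theorem pv_foldl_append (l : List String) (a b : String) :
    List.foldl (fun r s => r ++ s) (a ++ b) l = a ++ List.foldl (fun r s => r ++ s) b l := by
  induction l generalizing b with
  | nil => rfl
  | cons x l ih => rw [List.foldl_cons, List.foldl_cons, String.append_assoc, ih]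

theorem pv_join_cons (x : String) (l : List String) :
    String.join (x :: l) = x ++ String.join l := by
  show List.foldl (fun r s => r ++ s) ("" : String) (x :: l) = x ++ String.join l
  rw [List.foldl_cons, show ("" : String) ++ x = x ++ "" from by simp, pv_foldl_append]
  rfl

theorem pv_loopB (chat : List Int) (TC : String) (rl : List (String × String))
    (ps : List (Int × List (String × Int))) (fb cp : List String) :
    ps.foldl (pvBStep chat TC rl) (fb, cp)
      = (fb ++ ps.filterMap (pvFb? chat TC rl), cp ++ ps.filterMap (pvCp? chat TC)) := by
  induction ps generalizing fb cp with
  | nil => simp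
  | cons p ps ih =>
    simp only [List.foldl_cons, List.filterMap_cons]
    by_cases h : PySem.List.pyGetD chat p.1 0 = 3
    · rw [pvBStep_three chat TC rl _ p h, ih]
      simp [pvFb?, pvCp?, pvLab, h]
    · rw [pvBStep_not_three chat TC rl _ p h, ih]
      simp [pvFb?, pvCp?, pvLab, h]

theorem pv_loopA1 (chat : List Int) (TC : String) (rl : List (String × String))
    (ps : List (Int × List (String × Int))) (s : String) (b : Bool) :
    ps.foldl (pvAStep1 chat TC rl) (s, b)
      = (s ++ String.join (ps.filterMap (pvFb? chat TC rl)),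
         b || ps.any (fun p => PySem.List.pyGetD chat p.1 0 == 3)) := by
  induction ps generalizing s b with
  | nil => simp [String.join]
  | cons p ps ih =>
    simp only [List.foldl_cons, List.filterMap_cons, List.any_cons]
    by_cases h : PySem.List.pyGetD chat p.1 0 = 3
    · rw [pvAStep1_three chat TC rl _ p h, ih]
      simp [pvFb?, pvLab, h]
    · have hb : (PySem.List.pyGetD chat p.1 0 == 3) = false := by simp [h]
      rw [pvAStep1_not_three chat TC rl _ p h, ih]
      simp [pvFb?, pvLab, h, hb, pv_join_cons, String.append_assoc]

theorem pv_loopA2 (chat : List Int) (TC : String)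
    (ps : List (Int × List (String × Int))) (s : String) :
    ps.foldl (pvAStep2 chat TC) s = s ++ String.join (ps.filterMap (pvCp? chat TC)) := by
  induction ps generalizing s with
  | nil => simp [String.join]
  | cons p ps ih =>
    simp only [List.foldl_cons, List.filterMap_cons]
    by_cases h : PySem.List.pyGetD chat p.1 0 = 3
    · rw [pvAStep2_three chat TC _ p h, ih]
      simp [pvCp?, pvLab, h, pv_join_cons, String.append_assoc]
    · rw [pvAStep2_not_three chat TC _ p h, ih]
      simp [pvCp?, pvLab, h]

theorem pv_anyCp (chat : List Int) (TC : String) (ps : List (Int × List (String × Int))) :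
    (ps.filterMap (pvCp? chat TC) ≠ []) ↔ (ps.any (fun p => PySem.List.pyGetD chat p.1 0 == 3) = true) := by
  induction ps with
  | nil => simp
  | cons p ps _ih =>
    by_cases h : PySem.List.pyGetD chat p.1 0 = 3
    · simp [h, pvCp?, pvLab]
    · simp only [List.filterMap_cons, List.any_cons]
      simp [pvCp?, pvLab, h]

-- ===== VERDICT (by name: the statement is the Claim_ definition above) =====
theorem OneByOnePrompt2RecursiveHistoryBased_spec : Claim_equal_OneByOnePrompt2RecursiveHistoryBased := by
  intro json_objects chat TC rl _ _
  unfold Spec_OneByOnePrompt2RecursiveHistoryBased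
  by_cases hall : chat.all (fun label => label == 3) = true
  · simp [OneByOnePrompt2RecursiveHistoryBased, OneByOnePrompt2RecursiveHistoryBased_alt, hall]
  · simp only [OneByOnePrompt2RecursiveHistoryBased, OneByOnePrompt2RecursiveHistoryBased_alt, hall,
      if_false, Bool.false_eq_true]
    rw [show (fun (st : String × Bool) (p : Int × List (String × Int)) =>
          let label := PySem.List.pyGetD chat p.1 0
          if label ≠ 3 then
            (st.1
              ++ "\n\nFeedback Item " ++ PySem.Int.toStr (p.1 + 1) ++ ":"
              ++ "\nOriginal Index: " ++ PySem.Int.toStr ((PySem.Dict.mk p.2).getD "Original Index" 0)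
              ++ "\nLabel Received: " ++ PySem.Int.toStr label ++ " – meaning: "
              ++ (if label == 1 then "The chosen response better represents the concept '" ++ TC ++ "'."
                  else if label == 2 then "The concept '" ++ TC ++ "' is not present in any response."
                  else if label == 0 then "The concept '" ++ TC ++ "' is equally represented in both the chosen and rejected responses."
                  else "")
              ++ "This is the reason the llm gave for the target concept label:"
              ++ "\n The reason of one of the llms that labeled the concept: "
              ++ (PySem.Dict.mk rl).getD TC "",
             st.2)
          else (st.1, true)) = pvAStep1 chat TC rl from rfl]
    rw [show (fun (bp : String) (p : Int × List (String × Int)) =>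
          let label := PySem.List.pyGetD chat p.1 0
          if label == 3 then
            bp ++ "\n- Item " ++ PySem.Int.toStr (p.1 + 1)
               ++ " (Original Index: " ++ PySem.Int.toStr ((PySem.Dict.mk p.2).getD "Original Index" 0)
               ++ "): Label Received: " ++ PySem.Int.toStr label
               ++ " – meaning: The concept '" ++ TC
               ++ "' is now correctly represented in the rejected response."
          else bp) = pvAStep2 chat TC from rfl]
    rw [show (fun (parts : List String × List String) (p : Int × List (String × Int)) =>
          let label := PySem.List.pyGetD chat p.1 0
          if label == 3 then
            (parts.1, parts.2 ++ [pvCompletedBlock p.1 p.2 label TC])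
          else
            (parts.1 ++ [pvFeedbackBlock p.1 p.2 label TC rl], parts.2)) = pvBStep chat TC rl from rfl]
    rw [pv_loopA1, pv_loopB, pv_loopA2]
    by_cases hany : (PySem.List.enumerate json_objects).any (fun p => PySem.List.pyGetD chat p.1 0 == 3) = true
    · have hcp := (pv_anyCp chat TC (PySem.List.enumerate json_objects)).2 hany
      simp [hany, hcp, String.append_assoc]
    · have hcp : ¬ (PySem.List.enumerate json_objects).filterMap (pvCp? chat TC) ≠ [] := fun hne =>
        hany ((pv_anyCp chat TC (PySem.List.enumerate json_objects)).1 hne)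
      simp only [not_not] at hcp
      simp [hany, hcp, String.append_assoc]
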